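-- pv_equiv track=rewrite | github.com/kacperpradzynski/Machine-Learning | Linear regression/Regressor/regressor.py | inputs_permutations
-- ===== SOURCE A (Python) =====
-- def sums(length, total_sum):
--     if length == 1:
--         yield (total_sum,)
--     else:
--         for value in range(total_sum + 1):
--             for permutation in sums(length - 1, total_sum - value):
--                 yield (value,) + permutation
--
-- def inputs_permutations(inputs, k):
--     n = len(inputs[0])
--     perms = []
--     for i in range(1, k):
--         perms += list(sums(n, i))
--     new_inputs = []
--     for input in inputs:
--         new_input = []
--         for perm in perms:
--             val = 1
--             for i in range(len(perm)):
--                 if(perm[i] != 0):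
--                     val *= input[i] ** perm[i]
--             new_input.append(val)
--         new_inputs.append(new_input)
--     return new_inputs
-- ===== SOURCE B (Python) =====
-- def _monomial(row, perm):
--     val = 1
--     for x, e in zip(row, perm):
--         val *= x ** e
--     return val
--
-- def inputs_permutations(inputs, k):
--     n = len(inputs[0])
--     perms = []
--     for d in range(1, k):
--         # grow exponent prefixes position by position, tracking the remaining degree
--         level = [((), d)]
--         for _ in range(n - 1):
--             level = [(pre + (v,), rem - v) for (pre, rem) in level for v in range(rem + 1)]
--         perms += [pre + (rem,) for (pre, rem) in level]
--     return [[_monomial(row, perm) for perm in perms] for row in inputs]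
-- ===== Notes on version B (the rewrite author's own statement) =====
-- stated objective: alternative
-- what changed: The recursive `sums` generator is replaced by an iterative level-by-level expansion of exponent prefixes (a comprehension fold over positions tracking the remaining degree), and the guarded index loop per monomial by a plain zip product relying on x**0 == 1.
import Mathlib
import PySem

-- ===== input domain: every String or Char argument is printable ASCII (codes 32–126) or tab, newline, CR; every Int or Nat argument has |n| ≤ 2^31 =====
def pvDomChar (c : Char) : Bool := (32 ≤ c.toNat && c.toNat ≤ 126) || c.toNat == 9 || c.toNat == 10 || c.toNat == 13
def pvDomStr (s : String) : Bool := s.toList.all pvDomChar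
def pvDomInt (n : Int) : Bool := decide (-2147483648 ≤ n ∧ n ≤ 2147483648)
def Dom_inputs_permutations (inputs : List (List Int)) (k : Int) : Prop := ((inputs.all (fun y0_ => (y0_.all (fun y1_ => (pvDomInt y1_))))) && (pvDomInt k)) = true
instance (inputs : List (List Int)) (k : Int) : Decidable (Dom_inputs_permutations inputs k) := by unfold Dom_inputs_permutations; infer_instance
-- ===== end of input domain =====

-- B replaces the recursive `sums` generator by an iterative level-by-level prefix expansion
-- and the guarded index loop by a plain zip product (objective: alternative, same cost).

-- ===== PORT A =====
-- sums(length, total_sum); Python recurses forever for length = 0 (excluded by Pre_), the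
-- port returns [] there to be total.
def pvSumsA : Nat → Int → List (List Int)
  | 0, _ => []
  | 1, t => [[t]]
  | (n+2), t => (PySem.List.pyRange 0 (t+1) 1).flatMap
      (fun v => (pvSumsA (n+1) (t - v)).map (fun p => v :: p))

-- the inner `for i in range(len(perm)): if perm[i] != 0: val *= input[i] ** perm[i]` loop
def pvEvalA (input perm : List Int) : Int :=
  (List.range perm.length).foldl
    (fun val i => if perm.getD i 0 ≠ 0 then val * (input.getD i 0) ^ (perm.getD i 0).toNat else val) 1

-- inputs[0] raises IndexError on empty inputs (excluded by Pre_); headD stands in for it.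
def inputs_permutations (inputs : List (List Int)) (k : Int) : List (List Int) :=
  let n := (inputs.headD []).length
  let perms := (PySem.List.pyRange 1 k 1).foldl (fun acc i => acc ++ pvSumsA n i) []
  inputs.map (fun input => perms.map (fun perm => pvEvalA input perm))

-- ===== PORT B =====
def pvStepB (level : List (List Int × Int)) : List (List Int × Int) :=
  level.flatMap (fun pr => (PySem.List.pyRange 0 (pr.2+1) 1).map (fun v => (pr.1 ++ [v], pr.2 - v)))

def pvBuildB (n : Nat) (d : Int) : List (List Int) :=
  ((List.range (n-1)).foldl (fun lv _ => pvStepB lv) [([], d)]).map (fun pr => pr.1 ++ [pr.2])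

-- _monomial: val *= x ** e over zip(row, perm)
def pvEvalB (row perm : List Int) : Int :=
  (row.zip perm).foldl (fun val xe => val * xe.1 ^ xe.2.toNat) 1

def inputs_permutations_alt (inputs : List (List Int)) (k : Int) : List (List Int) :=
  let n := (inputs.headD []).length
  let perms := (PySem.List.pyRange 1 k 1).foldl (fun acc d => acc ++ pvBuildB n d) []
  inputs.map (fun row => perms.map (fun perm => pvEvalB row perm))

-- ===== PRECONDITION & SPEC =====
-- Pre_ admits exactly the inputs on which A returns: A raises IndexError on empty `inputs`;
-- for k ≥ 2 it recurses forever when the first row is empty and raises IndexError when some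
-- row is shorter than the first row.
def Pre_inputs_permutations (inputs : List (List Int)) (k : Int) : Prop :=
  inputs ≠ [] ∧ (k ≤ 1 ∨ (1 ≤ (inputs.headD []).length ∧
    ∀ row ∈ inputs, (inputs.headD []).length ≤ row.length))
instance (inputs : List (List Int)) (k : Int) : Decidable (Pre_inputs_permutations inputs k) := by
  unfold Pre_inputs_permutations; infer_instance

def pvWitness_inputs_permutations : List (List Int) × Int := ([[2, 3], [1, -1]], 3)

def Spec_inputs_permutations (inputs : List (List Int)) (k : Int) (out : List (List Int)) : Prop := out = inputs_permutations_alt inputs k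
instance (inputs : List (List Int)) (k : Int) (out : List (List Int)) : Decidable (Spec_inputs_permutations inputs k out) := by unfold Spec_inputs_permutations; infer_instance

-- ===== CLAIM (what is proved, stated in full; the proofs are below) =====
def Claim_equal_inputs_permutations : Prop := ∀ (inputs : List (List Int)) (k : Int), Dom_inputs_permutations inputs k → Pre_inputs_permutations inputs k → Spec_inputs_permutations inputs k (inputs_permutations inputs k)

-- ===== LEMMAS AND PROOFS =====

-- iterating pvStepB m times and then closing each pair yields the sums-trees of length m+1
theorem pvStep_iterate (m : Nat) : ∀ (L : List (List Int × Int)),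
    ((pvStepB^[m]) L).map (fun pr => pr.1 ++ [pr.2])
      = L.flatMap (fun pr => (pvSumsA (m+1) pr.2).map (fun p => pr.1 ++ p)) := by
  induction m with
  | zero =>
    intro L
    induction L with
    | nil => simp
    | cons hd tl ihL => simp_all [pvSumsA]
  | succ m ih =>
    intro L
    rw [Function.iterate_succ_apply, ih]
    show (pvStepB L).flatMap _ = _
    unfold pvStepB
    rw [List.flatMap_assoc]
    congr 1
    funext pr
    obtain ⟨pre, rem⟩ := pr
    show ((PySem.List.pyRange 0 (rem+1) 1).map
        (fun v => (pre ++ [v], rem - v))).flatMap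
          (fun pr => (pvSumsA (m+1) pr.2).map (fun p => pr.1 ++ p))
      = (pvSumsA (m+2) rem).map (fun p => pre ++ p)
    rw [List.flatMap_map]
    show _ = ((PySem.List.pyRange 0 (rem+1) 1).flatMap
        (fun v => (pvSumsA (m+1) (rem - v)).map (fun p => v :: p))).map (fun p => pre ++ p)
    rw [List.map_flatMap]
    congr 1
    funext v
    simp [List.map_map, Function.comp]

theorem foldl_step_eq_iterate (m : Nat) (L : List (List Int × Int)) :
    (List.range m).foldl (fun lv _ => pvStepB lv) L = (pvStepB^[m]) L := by
  induction m generalizing L with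
  | zero => simp
  | succ m ih =>
    rw [List.range_succ_eq_map]
    simp only [List.foldl_cons, List.foldl_map]
    rw [ih, ← Function.iterate_succ_apply]

theorem pvBuildB_eq_sums (n : Nat) (hn : 1 ≤ n) (d : Int) : pvBuildB n d = pvSumsA n d := by
  obtain ⟨m, rfl⟩ : ∃ m, n = m + 1 := ⟨n - 1, by omega⟩
  unfold pvBuildB
  rw [foldl_step_eq_iterate, pvStep_iterate]
  simp

theorem pvSumsA_length (n : Nat) : ∀ (d : Int) (p : List Int), p ∈ pvSumsA (n+1) d → p.length = n + 1 := by
  induction n with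
  | zero => intro d p hp; simp [pvSumsA] at hp; simp [hp]
  | succ n ih =>
    intro d p hp
    simp only [pvSumsA, List.mem_flatMap, List.mem_map] at hp
    obtain ⟨v, _, q, hq, rfl⟩ := hp
    simp [ih _ _ hq]

theorem pvEval_eq (perm : List Int) : ∀ (row : List Int) (c : Int),
    perm.length ≤ row.length →
    (List.range perm.length).foldl
      (fun val i => if perm.getD i 0 ≠ 0 then val * (row.getD i 0) ^ (perm.getD i 0).toNat else val) c
      = (row.zip perm).foldl (fun val xe => val * xe.1 ^ xe.2.toNat) c := by
  induction perm with
  | nil => intro row c _; simp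
  | cons e ps ih =>
    intro row c hlen
    cases row with
    | nil => simp at hlen
    | cons x xs =>
      rw [List.length_cons, List.range_succ_eq_map]
      simp only [List.foldl_cons, List.foldl_map, List.zip_cons_cons, List.getD_cons_zero,
        List.getD_cons_succ]
      have hstart : (if e ≠ 0 then c * x ^ e.toNat else c) = c * x ^ e.toNat := by
        by_cases he : e = 0
        · simp [he]
        · simp [he]
      rw [hstart, ih xs (c * x ^ e.toNat) (by simpa using hlen)]

-- ===== VERDICT (by name: the statement is the Claim_ definition above) =====
theorem inputs_permutations_spec : Claim_equal_inputs_permutations := by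
  intro inputs k _ hpre
  obtain ⟨hne, hrest⟩ := hpre
  simp only [Spec_inputs_permutations, inputs_permutations, inputs_permutations_alt]
  rcases hrest with hk | ⟨hn, hrows⟩
  · -- k ≤ 1: range(1, k) is empty, both sides map every row to []
    rw [PySem.List.pyRange_one_eq_nil hk]
    simp
  · -- k ≥ 2: the two perm lists coincide, and each monomial evaluates equally
    set n := (inputs.headD []).length with hn_def
    have hperms : (PySem.List.pyRange 1 k 1).foldl (fun acc i => acc ++ pvSumsA n i) []
        = (PySem.List.pyRange 1 k 1).foldl (fun acc d => acc ++ pvBuildB n d) [] := by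
      apply PySem.List.foldl_congr_mem
      intro acc i _
      rw [pvBuildB_eq_sums n hn]
    rw [← hperms]
    apply List.map_congr_left
    intro row hrow
    apply List.map_congr_left
    intro perm hperm
    rw [PySem.List.foldl_append_eq_flatMap] at hperm
    simp only [List.nil_append, List.mem_flatMap] at hperm
    obtain ⟨i, _, hpi⟩ := hperm
    obtain ⟨m, hm⟩ : ∃ m, n = m + 1 := ⟨n - 1, by omega⟩
    have hlen : perm.length = n := by rw [hm] at hpi ⊢; exact pvSumsA_length m i perm hpi
    unfold pvEvalA pvEvalB
    exact pvEval_eq perm row 1 (by rw [hlen]; exact hrows row hrow)
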